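-- pv_equiv track=rewrite | github.com/DMGDy/CS1120 | Programming_Assignment1/main.py | break_apart
-- ===== SOURCE A (Python) =====
-- def break_apart(my_string, my_delimiter):
--     #initializing empty list and empty string to add char to
--     new_list, list_entry = [], str("");
--
--     #for each char not equal to delimiter and ',', added to empty string until loop iterates through it
--     for char in range(len(my_string)):
--         if (my_string[char] == my_delimiter or my_string[char] == ','):
--             new_list.append(list_entry)
--             list_entry = str("");
--         else:
--             list_entry += str(my_string[char]);
--
--     return new_list;
-- ===== SOURCE B (Python) =====
-- def break_apart(my_string, my_delimiter):
--     # repeated find-first-boundary + slice; the trailing remainder after the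
--     # last boundary is dropped, exactly as in the original
--     out = []
--     s = my_string
--     while True:
--         i = next((k for k, ch in enumerate(s) if ch == my_delimiter or ch == ','), None)
--         if i is None:
--             return out
--         out.append(s[:i])
--         s = s[i+1:]
-- ===== Notes on version B (the rewrite author's own statement) =====
-- stated objective: alternative
-- what changed: Replaces the per-character accumulator loop by a find-first-boundary-then-slice recursion: repeatedly locate the next delimiter/comma position, emit the slice before it, and continue on the suffix (still dropping the trailing remainder like A).
import Mathlib
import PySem

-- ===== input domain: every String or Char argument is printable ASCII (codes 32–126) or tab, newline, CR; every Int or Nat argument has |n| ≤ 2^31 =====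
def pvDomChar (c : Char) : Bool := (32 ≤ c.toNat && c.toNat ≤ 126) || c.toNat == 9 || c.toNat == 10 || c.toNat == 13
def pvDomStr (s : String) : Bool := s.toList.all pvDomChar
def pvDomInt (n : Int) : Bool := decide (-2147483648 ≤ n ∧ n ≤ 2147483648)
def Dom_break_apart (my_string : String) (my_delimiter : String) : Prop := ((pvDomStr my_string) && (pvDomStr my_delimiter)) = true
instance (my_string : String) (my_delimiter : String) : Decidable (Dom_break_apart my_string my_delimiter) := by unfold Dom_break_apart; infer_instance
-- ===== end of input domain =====

-- B replaces A's per-character accumulator loop with a find-next-boundary-then-slice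
-- recursion (same O(n) cost, different decomposition); trailing remainder dropped as in A.


-- a single character (as Python's my_string[i]) equals the delimiter string, or is ','
def pvIsBound (d : String) (c : Char) : Bool := (String.mk [c] == d) || (c == ',')

-- ===== PORT A =====
-- A's loop over indices: accumulate chars of the current entry; on a boundary,
-- append the entry and reset; the entry left when the loop ends is dropped.
def breakApartGoA (d : String) : List Char → List Char → List String → List String
  | [], _, acc => acc
  | c :: cs, entry, acc =>
    if pvIsBound d c then breakApartGoA d cs [] (acc ++ [String.mk entry])
    else breakApartGoA d cs (entry ++ [c]) acc

def break_apart (my_string : String) (my_delimiter : String) : List String :=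
  breakApartGoA my_delimiter my_string.toList [] []

-- ===== PORT B =====
-- B: find the index of the next boundary; if none, stop (dropping the remainder);
-- else emit the slice before it and recurse on the suffix after it.
def breakApartGoB (d : String) (s : List Char) : List String :=
  match h : s.findIdx? (pvIsBound d) with
  | none => []
  | some i => String.mk (s.take i) :: breakApartGoB d (s.drop (i + 1))
termination_by s.length
decreasing_by
  have hi : i < s.length := (List.findIdx?_eq_some_iff_findIdx_eq.mp h).1
  simp only [List.length_drop]
  omega

def break_apart_alt (my_string : String) (my_delimiter : String) : List String :=
  breakApartGoB my_delimiter my_string.toList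

-- ===== PRECONDITION & SPEC =====
def Spec_break_apart (my_string : String) (my_delimiter : String) (out : List String) : Prop := out = break_apart_alt my_string my_delimiter
instance (my_string : String) (my_delimiter : String) (out : List String) : Decidable (Spec_break_apart my_string my_delimiter out) := by unfold Spec_break_apart; infer_instance

-- ===== CLAIM (what is proved, stated in full; the proofs are below) =====
def Claim_equal_break_apart : Prop := ∀ (my_string : String) (my_delimiter : String), Dom_break_apart my_string my_delimiter → Spec_break_apart my_string my_delimiter (break_apart my_string my_delimiter)

-- ===== LEMMAS AND PROOFS =====

-- findIdx? on a block of non-matching chars followed by a match finds the block's length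
theorem pv_findIdx?_block (p : Char → Bool) (entry : List Char) (c : Char) (cs : List Char)
    (he : ∀ x ∈ entry, p x = false) (hc : p c = true) :
    (entry ++ c :: cs).findIdx? p = some entry.length := by
  induction entry with
  | nil => simp [List.findIdx?_cons, hc]
  | cons a t ih =>
    have ha : p a = false := he a (by simp)
    have ht : ∀ x ∈ t, p x = false := fun x hx => he x (by simp [hx])
    simp [List.findIdx?_cons, ha, ih ht]

theorem pv_goB_no_bound (d : String) (entry : List Char)
    (he : ∀ x ∈ entry, pvIsBound d x = false) :
    breakApartGoB d entry = [] := by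
  unfold breakApartGoB
  split
  · rfl
  · next i h =>
    rw [List.findIdx?_eq_none_iff.mpr he] at h
    exact absurd h (by simp)

theorem pv_goB_bound (d : String) (entry : List Char) (c : Char) (cs : List Char)
    (he : ∀ x ∈ entry, pvIsBound d x = false) (hc : pvIsBound d c = true) :
    breakApartGoB d (entry ++ c :: cs) = String.mk entry :: breakApartGoB d cs := by
  rw [breakApartGoB]
  have h := pv_findIdx?_block (pvIsBound d) entry c cs he hc
  split
  · next h' => rw [h] at h'; exact absurd h' (by simp)
  · next i h' =>
    rw [h] at h'
    injection h' with h'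
    subst h'
    congr 1
    · congr 1
      simpa using List.take_left entry (c :: cs)
    · congr 1
      have : (entry ++ c :: cs).drop entry.length = c :: cs := by
        simpa using List.drop_left entry (c :: cs)
      calc (entry ++ c :: cs).drop (entry.length + 1)
          = ((entry ++ c :: cs).drop entry.length).drop 1 := by
            rw [List.drop_drop]
        _ = cs := by rw [this]; simp

theorem pv_goA_eq_goB (d : String) (cs : List Char) : ∀ (entry : List Char) (acc : List String),
    (∀ x ∈ entry, pvIsBound d x = false) →
    breakApartGoA d cs entry acc = acc ++ breakApartGoB d (entry ++ cs) := by
  induction cs with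
  | nil =>
    intro entry acc he
    simp [breakApartGoA, pv_goB_no_bound d entry he]
  | cons c cs ih =>
    intro entry acc he
    by_cases hc : pvIsBound d c = true
    · simp only [breakApartGoA, hc, if_pos]
      rw [ih [] (acc ++ [String.mk entry]) (by simp), pv_goB_bound d entry c cs he hc]
      simp
    · have hc' : pvIsBound d c = false := by simpa using hc
      simp only [breakApartGoA, hc', if_neg, Bool.false_eq_true, not_false_iff]
      rw [ih (entry ++ [c]) acc (by
        intro x hx
        rcases List.mem_append.mp hx with h | h
        · exact he x h
        · simp at h; subst h; exact hc')]
      simp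

-- ===== VERDICT (by name: the statement is the Claim_ definition above) =====
theorem break_apart_spec : Claim_equal_break_apart := by
  intro s d _
  unfold Spec_break_apart break_apart break_apart_alt
  simpa using pv_goA_eq_goB d s.toList [] [] (by simp)
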